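-- pv_equiv track=rewrite | github.com/ihmeuw/ihme-modeling | shared_code/central_comp/cod/codcorrect/codcorrect/restrictions.py | get_eligible_age_group_ids
-- ===== SOURCE A (Python) =====
-- def get_eligible_age_group_ids(age_start, age_end):
--     """ Returns list of eligible age_group_ids between the age_start
--         and age_end
--     """
--     # Age dictionaries and lists
--     age_data = ['0', '0.01', '0.1', '1', '5', '10', '15', '20', '25', '30',
--                 '35', '40', '45', '50', '55', '60', '65', '70', '75', '80',
--                 '85', '90', '95']
--     age_group_ids = {'10': 7, '60': 17, '30': 11, '15': 8, '25': 10, '0.1': 4,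
--                      '55': 16, '0.01': 3, '45': 14, '35': 12, '50': 15, '1': 5,
--                      '0': 2, '75': 20, '5': 6, '40': 13, '70': 19, '20': 9,
--                      '65': 18, '80': 30, '85': 31, '90': 32, '95': 235}
--     # Make sure age_start and age_end are strings
--     age_start = str(age_start)
--     age_end = str(age_end)
--     # Loop through and generate eligible age_groups
--     return_list = []
--     add = False
--     for age in age_data:
--         if age_start == age:
--             add = True
--         if add:
--             return_list.append(age_group_ids[age])
--         if age_end == age:
--             add = False
--     return return_list
-- ===== SOURCE B (Python) =====
-- def get_eligible_age_group_ids(age_start, age_end):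
--     """ Returns list of eligible age_group_ids between the age_start
--         and age_end
--     """
--     # single ordered table of (age label, age_group_id) pairs
--     pairs = [('0', 2), ('0.01', 3), ('0.1', 4), ('1', 5), ('5', 6),
--              ('10', 7), ('15', 8), ('20', 9), ('25', 10), ('30', 11),
--              ('35', 12), ('40', 13), ('45', 14), ('50', 15), ('55', 16),
--              ('60', 17), ('65', 18), ('70', 19), ('75', 20), ('80', 30),
--              ('85', 31), ('90', 32), ('95', 235)]
--     s = str(age_start)
--     e = str(age_end)
--     # drop everything strictly before the first occurrence of s
--     while pairs and pairs[0][0] != s: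
--         pairs = pairs[1:]
--     # take through the first occurrence of e (to the end if e never shows up)
--     out = []
--     for age, gid in pairs:
--         out.append(gid)
--         if age == e:
--             break
--     return out
-- ===== Notes on version B (the rewrite author's own statement) =====
-- stated objective: alternative
-- what changed: Replaces the boolean-toggle scan over a label list plus a dict lookup per element with a single ordered (label,id) pair table processed in two stages: drop the prefix before age_start, then take ids through the first occurrence of age_end (breaking out early), with no dict and no toggle flag.
import Mathlib
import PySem

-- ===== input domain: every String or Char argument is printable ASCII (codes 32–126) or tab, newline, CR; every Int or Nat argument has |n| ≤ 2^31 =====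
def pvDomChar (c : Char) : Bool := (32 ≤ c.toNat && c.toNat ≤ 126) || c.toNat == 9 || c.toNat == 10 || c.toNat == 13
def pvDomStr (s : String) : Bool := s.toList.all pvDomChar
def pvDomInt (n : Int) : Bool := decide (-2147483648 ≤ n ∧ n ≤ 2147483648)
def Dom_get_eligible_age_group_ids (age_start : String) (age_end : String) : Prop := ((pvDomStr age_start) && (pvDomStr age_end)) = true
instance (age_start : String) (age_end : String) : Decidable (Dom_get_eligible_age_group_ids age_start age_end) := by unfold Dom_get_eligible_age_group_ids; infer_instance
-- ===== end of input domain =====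

-- B replaces A's toggle-flag scan (label list + dict lookup per element) with a two-stage
-- drop-prefix / take-through pass over one ordered (label, id) pair table; alternative, same cost.

-- ===== PORT A =====
-- A-side constants (A's literals)
def pvAgeData : List String :=
  ["0", "0.01", "0.1", "1", "5", "10", "15", "20", "25", "30",
   "35", "40", "45", "50", "55", "60", "65", "70", "75", "80",
   "85", "90", "95"]

def pvAgeGroupIds : PySem.Dict String Int :=
  PySem.Dict.ofList [("10", 7), ("60", 17), ("30", 11), ("15", 8), ("25", 10), ("0.1", 4),
                     ("55", 16), ("0.01", 3), ("45", 14), ("35", 12), ("50", 15), ("1", 5),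
                     ("0", 2), ("75", 20), ("5", 6), ("40", 13), ("70", 19), ("20", 9),
                     ("65", 18), ("80", 30), ("85", 31), ("90", 32), ("95", 235)]

-- age_group_ids[age]: KeyError is impossible (every member of age_data is a key), so .getD 0 is exact
def pvLookup (age : String) : Int := (PySem.Dict.get? pvAgeGroupIds age).getD 0

-- str(age_start)/str(age_end) are the identity on str arguments; the for-loop is a foldl over (return_list, add)
def get_eligible_age_group_ids (age_start : String) (age_end : String) : List Int :=
  (pvAgeData.foldl (fun (st : List Int × Bool) age =>
      let add := if age_start == age then true else st.2
      let return_list := if add then st.1 ++ [pvLookup age] else st.1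
      let add := if age_end == age then false else add
      (return_list, add))
    ([], false)).1

-- ===== PORT B =====
-- B-side constant: one ordered table of (label, id) pairs
def pvPairs : List (String × Int) :=
  [("0", 2), ("0.01", 3), ("0.1", 4), ("1", 5), ("5", 6),
   ("10", 7), ("15", 8), ("20", 9), ("25", 10), ("30", 11),
   ("35", 12), ("40", 13), ("45", 14), ("50", 15), ("55", 16),
   ("60", 17), ("65", 18), ("70", 19), ("75", 20), ("80", 30),
   ("85", 31), ("90", 32), ("95", 235)]

-- Source B's for-loop with break: collect ids, stopping after the first label equal to e
def pvTakeThrough (e : String) : List (String × Int) → List Int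
  | [] => []
  | (age, gid) :: rest => if age == e then [gid] else gid :: pvTakeThrough e rest

-- Source B's while-loop pops the head while its label differs from s: that is dropWhile
def get_eligible_age_group_ids_alt (age_start : String) (age_end : String) : List Int :=
  pvTakeThrough age_end (pvPairs.dropWhile (fun p => p.1 != age_start))

-- ===== PRECONDITION & SPEC =====
def Spec_get_eligible_age_group_ids (age_start : String) (age_end : String) (out : List Int) : Prop := out = get_eligible_age_group_ids_alt age_start age_end
instance (age_start : String) (age_end : String) (out : List Int) : Decidable (Spec_get_eligible_age_group_ids age_start age_end out) := by unfold Spec_get_eligible_age_group_ids; infer_instance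

-- ===== CLAIM =====
def Claim_equal_get_eligible_age_group_ids : Prop := ∀ (age_start : String) (age_end : String), Dom_get_eligible_age_group_ids age_start age_end → Spec_get_eligible_age_group_ids age_start age_end (get_eligible_age_group_ids age_start age_end)

-- ===== LEMMAS AND PROOFS =====

-- A's loop body, named for the proofs (definitionally the lambda in port A)
def pvStep (s e : String) (st : List Int × Bool) (age : String) : List Int × Bool :=
  let add := if s == age then true else st.2
  let return_list := if add then st.1 ++ [pvLookup age] else st.1
  let add := if e == age then false else add
  (return_list, add)

-- prefix of t up to and including the first occurrence of e (all of t if e ∉ t)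
def pvTakeUntil (e : String) : List String → List String
  | [] => []
  | x :: t => if e = x then [x] else x :: pvTakeUntil e t

-- common characterisation of the result of both programs
def pvRun (s e : String) : List String → List Int
  | [] => []
  | x :: t => if s = x then
      (if e = x then [pvLookup x] else pvLookup x :: (pvTakeUntil e t).map pvLookup)
    else pvRun s e t

theorem pvFold_off (s e : String) (xs : List String) (acc : List Int) (hs : s ∉ xs) :
    xs.foldl (pvStep s e) (acc, false) = (acc, false) := by
  induction xs generalizing acc with
  | nil => rfl
  | cons x t ih =>
    have hne : s ≠ x := fun h => hs (h ▸ List.mem_cons_self)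
    have hstep : pvStep s e (acc, false) x = (acc, false) := by
      simp [pvStep, hne]
    rw [List.foldl_cons, hstep]
    exact ih acc (fun h => hs (List.mem_cons_of_mem _ h))

theorem pvFold_on (s e : String) (xs : List String) (acc : List Int) (hs : s ∉ xs) :
    (xs.foldl (pvStep s e) (acc, true)).1 = acc ++ (pvTakeUntil e xs).map pvLookup := by
  induction xs generalizing acc with
  | nil => simp [pvTakeUntil]
  | cons x t ih =>
    have hst : s ∉ t := fun h => hs (List.mem_cons_of_mem _ h)
    by_cases he : e = x
    · have hstep : pvStep s e (acc, true) x = (acc ++ [pvLookup x], false) := by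
        simp [pvStep, he]
      rw [List.foldl_cons, hstep, pvFold_off s e t _ hst]
      simp [pvTakeUntil, he]
    · have hstep : pvStep s e (acc, true) x = (acc ++ [pvLookup x], true) := by
        simp [pvStep, he]
      rw [List.foldl_cons, hstep, ih _ hst]
      simp [pvTakeUntil, he]

theorem pvFold_main (s e : String) (xs : List String) (acc : List Int)
    (hs : xs.count s ≤ 1) :
    (xs.foldl (pvStep s e) (acc, false)).1 = acc ++ pvRun s e xs := by
  induction xs generalizing acc with
  | nil => simp [pvRun]
  | cons x t ih =>
    by_cases hsx : s = x
    · have hst : s ∉ t := by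
        intro h
        have hpos := List.count_pos_iff.mpr h
        rw [List.count_cons, if_pos (by simp [hsx])] at hs
        omega
      by_cases he : e = x
      · have hstep : pvStep s e (acc, false) x = (acc ++ [pvLookup x], false) := by
          simp [pvStep, hsx, he]
        rw [List.foldl_cons, hstep, pvFold_off s e t _ hst]
        simp [pvRun, hsx, he]
      · have hstep : pvStep s e (acc, false) x = (acc ++ [pvLookup x], true) := by
          simp [pvStep, hsx, he]
        rw [List.foldl_cons, hstep, pvFold_on s e t _ hst]
        simp [pvRun, hsx, he]
    · have hst : t.count s ≤ 1 := by
        rw [List.count_cons] at hs; omega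
      have hstep : pvStep s e (acc, false) x = (acc, false) := by
        simp [pvStep, hsx]
      rw [List.foldl_cons, hstep, ih _ hst]
      simp [pvRun, hsx]

-- each pair of pvPairs is (a, pvLookup a) for the corresponding element of pvAgeData
def pvF (a : String) : String × Int := (a, pvLookup a)

theorem pvPairs_eq_map : pvPairs = pvAgeData.map pvF := by decide

theorem pvTakeThrough_map (e : String) (t : List String) :
    pvTakeThrough e (t.map pvF) = (pvTakeUntil e t).map pvLookup := by
  induction t with
  | nil => rfl
  | cons x t ih =>
    by_cases he : x = e
    · simp [pvTakeThrough, pvTakeUntil, pvF, he]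
    · have hne : e ≠ x := fun h => he h.symm
      simp [pvTakeThrough, pvTakeUntil, pvF, he, hne, ih]

theorem pvDrop_run (s e : String) (xs : List String) :
    pvTakeThrough e ((xs.map pvF).dropWhile (fun p => p.1 != s)) = pvRun s e xs := by
  induction xs with
  | nil => rfl
  | cons x t ih =>
    by_cases hsx : s = x
    · subst hsx
      rw [List.map_cons, List.dropWhile_cons]
      simp only [pvF, bne_self_eq_false, Bool.false_eq_true, if_false]
      by_cases he : s = e
      · subst he; simp [pvTakeThrough, pvRun]
      · have hes : e ≠ s := fun h => he h.symm
        simp [pvTakeThrough, pvRun, he, hes, pvTakeThrough_map]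
    · have hxs : x ≠ s := fun h => hsx h.symm
      rw [List.map_cons, List.dropWhile_cons]
      simp only [pvF, bne_iff_ne, ne_eq, hxs, not_false_eq_true, if_true]
      simp [pvRun, hsx, ih]

theorem pvAgeData_count (s : String) : pvAgeData.count s ≤ 1 :=
  List.nodup_iff_count_le_one.mp (by decide) s

-- ===== VERDICT =====
theorem get_eligible_age_group_ids_spec : Claim_equal_get_eligible_age_group_ids := by
  intro s e _
  unfold Spec_get_eligible_age_group_ids
  have hA : get_eligible_age_group_ids s e = (pvAgeData.foldl (pvStep s e) ([], false)).1 := rfl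
  rw [hA, pvFold_main s e pvAgeData [] (pvAgeData_count s)]
  show pvRun s e pvAgeData = get_eligible_age_group_ids_alt s e
  rw [get_eligible_age_group_ids_alt, pvPairs_eq_map, pvDrop_run]
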